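-- pv_equiv track=rewrite | github.com/Lookyloo/pysecuritytxt | pysecuritytxt/api.py | _all_possible_domains
-- ===== SOURCE A (Python) =====
-- from typing import Set, Union, Dict, List
--
-- def _all_possible_domains(hostname: str) -> Set[str]:
--     hostname_parts = hostname.split('.')
--     if len(hostname_parts) <= 2:
--         return {hostname, }
--     current_domain = '.'.join(hostname_parts[-2:])
--     to_return: Set[str] = {current_domain, }
--     for domain_part in reversed(hostname_parts[:-2]):
--         current_domain = f'{domain_part}.{current_domain}'
--         to_return.add(current_domain)
--     return to_return
-- ===== SOURCE B (Python) =====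
-- from typing import Set
--
-- def _all_possible_domains(hostname: str) -> Set[str]:
--     parts = hostname.split('.')
--     n = len(parts)
--     if n <= 2:
--         return {hostname}
--     return {'.'.join(parts[i:]) for i in range(n - 2, -1, -1)}
-- ===== Notes on version B (the rewrite author's own statement) =====
-- stated objective: simpler
-- what changed: Replaces A's running-accumulator loop (prepending one label per iteration to a mutable current_domain and adding it to the set) by a single set comprehension that computes each suffix domain independently by joining the suffix slice parts[i:] over the suffix start indices.
import Mathlib
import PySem

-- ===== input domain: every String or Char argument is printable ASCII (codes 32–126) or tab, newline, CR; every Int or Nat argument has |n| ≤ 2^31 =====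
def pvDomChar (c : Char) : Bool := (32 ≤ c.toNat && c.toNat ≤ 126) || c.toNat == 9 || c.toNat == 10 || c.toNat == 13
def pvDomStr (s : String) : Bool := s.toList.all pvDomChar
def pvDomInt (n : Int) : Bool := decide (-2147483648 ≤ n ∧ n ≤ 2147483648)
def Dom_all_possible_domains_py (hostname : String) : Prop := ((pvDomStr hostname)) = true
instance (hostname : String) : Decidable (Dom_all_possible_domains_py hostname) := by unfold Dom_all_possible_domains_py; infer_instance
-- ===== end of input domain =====

-- B replaces A's running-accumulator loop by a direct set comprehension over suffix slices (objective: simpler).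
-- Both return a Python set; the element lists below carry its insertion order.

-- ===== PORT A =====
-- f'{domain_part}.{current_domain}': exact code-point concatenation
def pvDot (a b : String) : String := String.ofList (a.toList ++ '.' :: b.toList)

def all_possible_domains_py (hostname : String) : List String :=
  let hostname_parts := (PySem.Str.split? hostname ".").getD []   -- sep "." ≠ "", so split? is always some
  if hostname_parts.length ≤ 2 then [hostname]
  else
    let current_domain := PySem.Str.join "." (PySem.List.slice hostname_parts (some (-2)) none)
    let to_return : PySem.Set String := PySem.Set.ofList [current_domain]
    let st := ((PySem.List.slice hostname_parts none (some (-2))).reverse).foldl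
      (fun (st : String × PySem.Set String) domain_part =>
        let c := pvDot domain_part st.1
        (c, PySem.Set.add st.2 c)) (current_domain, to_return)
    st.2

-- ===== PORT B =====
def all_possible_domains_py_alt (hostname : String) : List String :=
  let parts := (PySem.Str.split? hostname ".").getD []   -- sep "." ≠ "", so split? is always some
  let n : Int := parts.length
  if n ≤ 2 then [hostname]
  else
    PySem.Set.ofList ((PySem.List.pyRange (n - 2) (-1) (-1)).map
      (fun i => PySem.Str.join "." (PySem.List.slice parts (some i) none)))

-- ===== PRECONDITION & SPEC =====
def Spec_all_possible_domains_py (hostname : String) (out : List String) : Prop := out = all_possible_domains_py_alt hostname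
instance (hostname : String) (out : List String) : Decidable (Spec_all_possible_domains_py hostname out) := by unfold Spec_all_possible_domains_py; infer_instance

-- ===== CLAIM (what is proved, stated in full; the proofs are below) =====
def Claim_equal_all_possible_domains_py : Prop := ∀ (hostname : String), Dom_all_possible_domains_py hostname → Spec_all_possible_domains_py hostname (all_possible_domains_py hostname)

-- ===== LEMMAS AND PROOFS =====

-- the suffix domain starting at index i
def pvG (parts : List String) (i : Int) : String :=
  PySem.Str.join "." (PySem.List.slice parts (some i) none)

-- the successive values of A's current_domain while folding over l
def pvChain : List String → String → List String
  | [], _ => []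
  | d :: l, cur => pvDot d cur :: pvChain l (pvDot d cur)

lemma pvDot_len (a b : String) :
    (pvDot a b).toList.length = a.toList.length + 1 + b.toList.length := by
  simp [pvDot]; omega

lemma pvChain_len (l : List String) (cur : String) :
    ∀ s ∈ pvChain l cur, cur.toList.length < s.toList.length := by
  induction l generalizing cur with
  | nil => simp [pvChain]
  | cons d l ih =>
    intro s hs
    simp only [pvChain, List.mem_cons] at hs
    rcases hs with rfl | hs
    · rw [pvDot_len]; omega
    · have := ih (pvDot d cur) s hs
      rw [pvDot_len] at this; omega

lemma pvChain_nodup (l : List String) (cur : String) :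
    (cur :: pvChain l cur).Nodup := by
  induction l generalizing cur with
  | nil => simp [pvChain]
  | cons d l ih =>
    refine List.Nodup.cons ?_ (ih (pvDot d cur))
    intro hmem
    have := pvChain_len (d :: l) cur cur hmem
    omega

-- A's loop, run from state (cur, seen): every add appends, because each new
-- current_domain is strictly longer than everything seen so far
lemma pvLoop (l : List String) (cur : String) (seen : List String)
    (hseen : ∀ s ∈ seen, s.toList.length ≤ cur.toList.length) :
    l.foldl (fun (st : String × PySem.Set String) domain_part =>
        let c := pvDot domain_part st.1
        (c, PySem.Set.add st.2 c)) (cur, seen)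
      = ((pvChain l cur).getLastD cur, seen ++ pvChain l cur) := by
  induction l generalizing cur seen with
  | nil => simp [pvChain]
  | cons d l ih =>
    have hnot : pvDot d cur ∉ seen := by
      intro hmem
      have := hseen _ hmem
      rw [pvDot_len] at this; omega
    have hadd : PySem.Set.add seen (pvDot d cur) = seen ++ [pvDot d cur] :=
      PySem.Set.add_of_not_mem hnot
    simp only [List.foldl_cons, hadd]
    rw [ih (pvDot d cur) (seen ++ [pvDot d cur]) ?_]
    · simp only [pvChain, List.getLastD_cons]
      simp
    · intro s hs
      rcases List.mem_append.mp hs with h | h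
      · have := hseen _ h
        rw [pvDot_len]; omega
      · simp at h; rw [h]

lemma pvG_step (parts : List String) (i : Nat) (h : i + 1 < parts.length) :
    pvG parts i = pvDot (parts[i]'(by omega)) (pvG parts ((i + 1 : Nat) : Int)) := by
  have hi : i < parts.length := by omega
  have hdrop : parts.drop i = parts[i] :: parts.drop (i + 1) :=
    List.drop_eq_getElem_cons hi
  have hne : parts.drop (i + 1) ≠ [] := by
    simp [List.drop_eq_nil_iff]; omega
  obtain ⟨q, rest, hqr⟩ := List.exists_cons_of_ne_nil hne
  apply String.toList_inj.mp
  simp only [pvG, PySem.List.slice_some_none, PySem.List.clampIdx_natCast,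
    Nat.min_eq_left (by omega : i ≤ parts.length),
    Nat.min_eq_left (by omega : i + 1 ≤ parts.length)]
  rw [hdrop, hqr]
  simp only [PySem.Str.toList_join, List.map_cons, PySem.Chars.join_cons_cons, pvDot]
  simp

lemma pvMap (parts : List String) (k : Nat) (hk : k < parts.length) :
    (PySem.List.pyRange (k : Int) (-1) (-1)).map (fun i => pvG parts i)
      = pvG parts k :: pvChain ((parts.take k).reverse) (pvG parts k) := by
  induction k with
  | zero =>
    rw [PySem.List.pyRange_neg_one_cons (by omega),
        PySem.List.pyRange_neg_one_eq_nil (by omega)]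
    simp [pvChain]
  | succ k ih =>
    have hk' : k < parts.length := by omega
    have : ((k : Int) + 1) = ((k + 1 : Nat) : Int) := by push_cast; ring
    rw [PySem.List.pyRange_neg_one_cons (a := ((k + 1 : Nat) : Int)) (by push_cast; omega),
        show ((k + 1 : Nat) : Int) - 1 = (k : Int) by push_cast; ring]
    simp only [List.map_cons, ih hk']
    have htake : parts.take (k + 1) = parts.take k ++ [parts[k]'hk'] :=
      List.take_succ_eq_append_getElem hk'
    rw [htake, List.reverse_append, List.reverse_singleton]
    simp only [List.singleton_append, pvChain]
    rw [← pvG_step parts k (by omega)]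

lemma pvClampNeg (n : Nat) (h : 2 ≤ n) : PySem.List.clampIdx n (-2) = n - 2 := by
  unfold PySem.List.clampIdx
  split_ifs <;> omega

-- ===== VERDICT (by name: the statement is the Claim_ definition above) =====
theorem all_possible_domains_py_spec : Claim_equal_all_possible_domains_py := by
  intro hostname _
  unfold Spec_all_possible_domains_py all_possible_domains_py all_possible_domains_py_alt
  simp only []
  set parts := (PySem.Str.split? hostname ".").getD [] with hparts
  by_cases hle : parts.length ≤ 2
  · rw [if_pos hle, if_pos (by exact_mod_cast hle)]
  · rw [if_neg hle, if_neg (by exact_mod_cast hle)]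
    have hlen : 3 ≤ parts.length := by omega
    -- identify A's current_domain with pvG parts (parts.length - 2)
    have hcur : PySem.Str.join "." (PySem.List.slice parts (some (-2)) none)
        = pvG parts ((parts.length - 2 : Nat) : Int) := by
      simp only [pvG, PySem.List.slice_some_none, PySem.List.clampIdx_natCast,
        pvClampNeg parts.length (by omega),
        Nat.min_eq_left (by omega : parts.length - 2 ≤ parts.length)]
    -- identify the folded list with (parts.take (parts.length - 2)).reverse
    have hpre : PySem.List.slice parts none (some (-2))
        = parts.take (parts.length - 2) := by
      unfold PySem.List.slice
      simp [pvClampNeg parts.length (by omega)]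
    have hcast : (parts.length : Int) - 2 = ((parts.length - 2 : Nat) : Int) := by omega
    rw [hcur, hpre, hcast]
    have hofone : PySem.Set.ofList [pvG parts ((parts.length - 2 : Nat) : Int)]
        = [pvG parts ((parts.length - 2 : Nat) : Int)] := rfl
    rw [hofone, pvLoop _ _ _ (by intro s hs; simp at hs; rw [hs])]
    have hfun : (fun i => PySem.Str.join "." (PySem.List.slice parts (some i) none))
        = fun i => pvG parts i := rfl
    rw [hfun, pvMap parts (parts.length - 2) (by omega)]
    rw [PySem.Set.ofList_eq_self_of_nodup _ (pvChain_nodup _ _)]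
    simp
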